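-- pv_equiv track=rewrite | github.com/mukunda1518/Data-Structures-Algorithms | stacks/find_unique_pairs.py | get_unique_pairs_count
-- ===== SOURCE A (Python) =====
-- def get_max_and_sec_max(sub_arr):
--     len_ = len(sub_arr)
--     x = max(sub_arr)
--     y = min(sub_arr)
--     for num in sub_arr:
--         if num < x and num > y:
--             y = num
--     return (x, y)
--
-- def get_unique_pairs_count(nums, n):
--     unique_pairs = []
--     for k in range(2, n+1):
--         for j in range(0, n - k + 1):
--             sub_arr = nums[j:k+j]
--             x, y = get_max_and_sec_max(sub_arr)
--             if (x, y) not in unique_pairs: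
--                 unique_pairs.append((x, y))
--     return len(unique_pairs)
-- ===== SOURCE B (Python) =====
-- def get_unique_pairs_count(nums, n):
--     # One pass per start index: extend the window rightwards, maintaining the
--     # max x and the "second value" y (largest element < x, or x if all equal)
--     # incrementally, collecting pairs in a set.  O(n^2) vs A's O(n^3).
--     pairs = set()
--     for j in range(n - 1):
--         x = y = nums[j]
--         for i in range(j + 1, n):
--             v = nums[i]
--             if v > x:
--                 y = x
--                 x = v
--             elif v < x and (y == x or v > y):
--                 y = v
--             pairs.add((x, y))
--     return len(pairs)
-- ===== Notes on version B (the rewrite author's own statement) =====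
-- stated objective: faster
-- what changed: replaces A's O(n^3) re-scan of every subarray (plus a linear membership list) with one incremental max/second-max sweep per start index, collecting pairs in a set
-- outside the precondition, e.g. on get_unique_pairs_count([5], 2): A returns 1, B raises IndexError
import Mathlib
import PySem

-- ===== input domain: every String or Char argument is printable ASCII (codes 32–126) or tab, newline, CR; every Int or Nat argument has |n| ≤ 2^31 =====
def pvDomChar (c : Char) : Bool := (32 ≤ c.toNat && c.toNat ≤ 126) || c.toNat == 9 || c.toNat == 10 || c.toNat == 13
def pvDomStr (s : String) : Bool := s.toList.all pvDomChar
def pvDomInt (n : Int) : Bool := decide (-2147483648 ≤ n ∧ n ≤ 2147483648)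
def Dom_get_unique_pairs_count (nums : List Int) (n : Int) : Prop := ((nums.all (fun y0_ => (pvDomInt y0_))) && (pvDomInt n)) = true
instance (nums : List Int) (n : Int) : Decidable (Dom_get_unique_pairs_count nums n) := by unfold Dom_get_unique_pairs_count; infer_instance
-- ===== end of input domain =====

-- B replaces A's O(n^3) re-scan of every subarray with one incremental max/second-max
-- sweep per start index, collecting the pairs in a set (return value only; no mutation).

-- ===== PORT A =====
def get_max_and_sec_max (sub_arr : List Int) : Int × Int :=
  -- len_ is computed and unused in the Python; max/min of [] raise ValueError (excluded by Pre_)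
  let x := (PySem.List.max? sub_arr (fun z => z)).getD 0
  let y := (PySem.List.min? sub_arr (fun z => z)).getD 0
  let y := sub_arr.foldl (fun y num => if num < x ∧ num > y then num else y) y
  (x, y)

def get_unique_pairs_count (nums : List Int) (n : Int) : Int :=
  let unique_pairs : List (Int × Int) :=
    (PySem.List.pyRange 2 (n + 1) 1).foldl (fun up k =>
      (PySem.List.pyRange 0 (n - k + 1) 1).foldl (fun up j =>
        let sub_arr := PySem.List.slice nums (some j) (some (k + j))
        let xy := get_max_and_sec_max sub_arr
        if xy ∈ up then up else up ++ [xy]) up) []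
  (unique_pairs.length : Int)

-- ===== PORT B =====
def get_unique_pairs_count_alt (nums : List Int) (n : Int) : Int :=
  let pairs : PySem.Set (Int × Int) :=
    (PySem.List.pyRange 0 (n - 1) 1).foldl (fun pairs j =>
      -- nums[j]; IndexError for out-of-range j is excluded by Pre_
      let x := PySem.List.pyGetD nums j 0
      ((PySem.List.pyRange (j + 1) n 1).foldl
        (fun (st : Int × Int × PySem.Set (Int × Int)) i =>
          let v := PySem.List.pyGetD nums i 0
          let xy : Int × Int :=
            if v > st.1 then (v, st.1)
            else if v < st.1 ∧ (st.2.1 = st.1 ∨ v > st.2.1) then (st.1, v)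
            else (st.1, st.2.1)
          (xy.1, xy.2, PySem.Set.add st.2.2 xy)) (x, x, pairs)).2.2) PySem.Set.empty
  (pairs.length : Int)

-- ===== PRECONDITION & SPEC =====
-- Pre_ excludes n > len(nums): there A raises ValueError on an empty slice or counts
-- accidental truncated (even single-element) windows, and B raises IndexError.
def Pre_get_unique_pairs_count (nums : List Int) (n : Int) : Prop := n ≤ (nums.length : Int)
instance (nums : List Int) (n : Int) : Decidable (Pre_get_unique_pairs_count nums n) := by
  unfold Pre_get_unique_pairs_count; infer_instance

def pvWitness_get_unique_pairs_count : List Int × Int := ([3, 1, 4, 1, 5], 5)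

def Spec_get_unique_pairs_count (nums : List Int) (n : Int) (out : Int) : Prop :=
  out = get_unique_pairs_count_alt nums n
instance (nums : List Int) (n : Int) (out : Int) : Decidable (Spec_get_unique_pairs_count nums n out) := by
  unfold Spec_get_unique_pairs_count; infer_instance

-- ===== CLAIM (what is proved, stated in full; the proofs are below) =====
def Claim_equal_get_unique_pairs_count : Prop := ∀ (nums : List Int) (n : Int), Dom_get_unique_pairs_count nums n → Pre_get_unique_pairs_count nums n → Spec_get_unique_pairs_count nums n (get_unique_pairs_count nums n)

-- ===== LEMMAS AND PROOFS =====

-- B's incremental update of (max, second) and the (max, second) pair of a window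
def stepP (p : Int × Int) (v : Int) : Int × Int :=
  if v > p.1 then (v, p.1)
  else if v < p.1 ∧ (p.2 = p.1 ∨ v > p.2) then (p.1, v)
  else (p.1, p.2)

def pairOf (a : Int) (t : List Int) : Int × Int :=
  (t.foldl max a,
   ((a :: t).filter (fun z => decide (z < t.foldl max a))).foldl max (t.foldl min a))

-- the pairs produced, in order, by B's inner loop started in state (x, y)
def bPairs (nums : List Int) (x y : Int) : List Int → List (Int × Int)
  | [] => []
  | i :: rest =>
    let p := stepP (x, y) (PySem.List.pyGetD nums i 0)
    p :: bPairs nums p.1 p.2 rest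

-- the pair streams of the two loop nests
def LA (nums : List Int) (n : Int) : List (Int × Int) :=
  (PySem.List.pyRange 2 (n + 1) 1).flatMap (fun k =>
    (PySem.List.pyRange 0 (n - k + 1) 1).map (fun j =>
      get_max_and_sec_max (PySem.List.slice nums (some j) (some (k + j)))))

def LB (nums : List Int) (n : Int) : List (Int × Int) :=
  (PySem.List.pyRange 0 (n - 1) 1).flatMap (fun j =>
    bPairs nums (PySem.List.pyGetD nums j 0) (PySem.List.pyGetD nums j 0)
      (PySem.List.pyRange (j + 1) n 1))

-- the (max, second) pair of the window nums[jn:en]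
def wp (nums : List Int) (jn en : Nat) : Int × Int :=
  pairOf (PySem.List.pyGetD nums (jn : Int) 0) ((nums.drop (jn + 1)).take (en - (jn + 1)))

-- ---- small foldl max/min facts ----
theorem le_foldl_max (b : Int) (l : List Int) : b ≤ List.foldl max b l := by
  induction l generalizing b with
  | nil => simp
  | cons x t ih => exact le_trans (le_max_left b x) (ih _)

theorem mem_le_foldl_max {x : Int} {l : List Int} (hx : x ∈ l) (b : Int) :
    x ≤ List.foldl max b l := by
  induction l generalizing b with
  | nil => simp at hx
  | cons y t ih =>
    rcases List.mem_cons.mp hx with h | h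
    · subst h; exact le_trans (le_max_right b x) (le_foldl_max _ _)
    · exact ih h _

theorem foldl_min_le (b : Int) (l : List Int) : List.foldl min b l ≤ b := by
  induction l generalizing b with
  | nil => simp
  | cons x t ih => exact le_trans (ih _) (min_le_left b x)

theorem foldl_min_le_mem {x : Int} {l : List Int} (hx : x ∈ l) (b : Int) :
    List.foldl min b l ≤ x := by
  induction l generalizing b with
  | nil => simp at hx
  | cons y t ih =>
    rcases List.mem_cons.mp hx with h | h
    · subst h
      simp only [List.foldl_cons]
      exact le_trans (foldl_min_le _ _) (min_le_right b x)
    · exact ih h _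

theorem foldl_max_absorb {b x : Int} (t : List Int) (h : b ≤ x) :
    List.foldl max b (x :: t) = List.foldl max x t := by
  simp [List.foldl_cons, max_eq_right h]

theorem foldl_max_append (b v : Int) (l : List Int) :
    List.foldl max b (l ++ [v]) = max (List.foldl max b l) v := by
  simp [List.foldl_append]

theorem foldl_min_append (b v : Int) (l : List Int) :
    List.foldl min b (l ++ [v]) = min (List.foldl min b l) v := by
  simp [List.foldl_append]

theorem foldl_max_lt {c b : Int} {l : List Int} (hb : b < c) (h : ∀ x ∈ l, x < c) :
    List.foldl max b l < c := by
  induction l generalizing b with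
  | nil => simpa using hb
  | cons x t ih =>
    simp only [List.foldl_cons]
    exact ih (max_lt hb (h x (by simp))) (fun z hz => h z (by simp [hz]))

theorem foldl_min_mem (b : Int) (l : List Int) : List.foldl min b l ∈ b :: l := by
  induction l generalizing b with
  | nil => simp
  | cons x t ih =>
    simp only [List.foldl_cons]
    rcases List.mem_cons.mp (ih (min b x)) with h | h
    · rcases min_choice b x with h' | h' <;> rw [h] <;> simp [h']
    · simp [h]

-- ---- K1: the helper of A computes pairOf on a nonempty list ----
theorem foldl_ite_filter_max (M : Int) (l : List Int) (m : Int) :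
    l.foldl (fun y num => if num < M ∧ num > y then num else y) m
      = (l.filter (fun z => decide (z < M))).foldl max m := by
  induction l generalizing m with
  | nil => rfl
  | cons x t ih =>
    simp only [List.foldl_cons, List.filter_cons]
    rw [ih]
    by_cases hx : x < M
    · have hstep : (if x < M ∧ x > m then x else m) = max m x := by
        by_cases hxm : m < x
        · simp [hx, hxm, max_eq_right hxm.le]
        · simp [hx, hxm, max_eq_left (not_lt.mp hxm)]
      rw [hstep]
      simp [hx, List.foldl_cons]
    · have hstep : (if x < M ∧ x > m then x else m) = m := by simp [hx]
      rw [hstep]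
      simp [hx]

theorem gm_cons (a : Int) (t : List Int) :
    get_max_and_sec_max (a :: t) = pairOf a t := by
  unfold get_max_and_sec_max pairOf
  rw [PySem.List.max?_id_cons, PySem.List.min?_id_cons]
  simp only [Option.getD_some]
  exact congrArg (Prod.mk (t.foldl max a)) (foldl_ite_filter_max (t.foldl max a) (a :: t) (t.foldl min a))

-- ---- K2: one step of B extends the window by one element ----
theorem stepP_pairOf (a v : Int) (t : List Int) :
    stepP (pairOf a t) v = pairOf a (t ++ [v]) := by
  unfold pairOf stepP
  have hM' : (t ++ [v]).foldl max a = max (t.foldl max a) v := foldl_max_append a v t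
  have hm' : (t ++ [v]).foldl min a = min (t.foldl min a) v := foldl_min_append a v t
  set M := t.foldl max a with hMdef
  set m := t.foldl min a with hmdef
  have hmA : m ≤ a := foldl_min_le a t
  have haM : a ≤ M := le_foldl_max a t
  have hmM : m ≤ M := le_trans hmA haM
  have hallM : ∀ x ∈ a :: t, x ≤ M := by
    intro x hx
    rcases List.mem_cons.mp hx with h | h
    · subst h; exact haM
    · exact mem_le_foldl_max h a
  have hallm : ∀ x ∈ a :: t, m ≤ x := by
    intro x hx
    rcases List.mem_cons.mp hx with h | h
    · subst h; exact hmA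
    · exact foldl_min_le_mem h a
  set F := (a :: t).filter (fun z => decide (z < M)) with hFdef
  set s := F.foldl max m with hsdef
  have hFmem : ∀ x ∈ F, x ∈ a :: t ∧ x < M := by
    intro x hx
    have := List.mem_filter.mp hx
    exact ⟨this.1, by simpa using this.2⟩
  have hcons : a :: (t ++ [v]) = (a :: t) ++ [v] := by simp
  rcases lt_trichotomy v M with hvM | hvM | hvM
  · -- v < M : max stays, v joins the filtered list
    have hMeq : max M v = M := max_eq_left hvM.le
    rw [hM', hm', hMeq, hcons, List.filter_append]
    have : List.filter (fun z => decide (z < M)) [v] = [v] := by simp [hvM]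
    rw [this, foldl_max_append]
    have hvpos : ¬ v > M := not_lt.mpr hvM.le
    by_cases hFnil : F = []
    · have hmMeq : m = M := by
        have hmem : m ∈ a :: t := by
          rcases List.mem_cons.mp (foldl_min_mem a t) with h | h
          · rw [hmdef, h]; simp
          · exact List.mem_cons_of_mem _ h
        by_contra hne
        have hlt : m < M := lt_of_le_of_ne hmM hne
        have : m ∈ F := List.mem_filter.mpr ⟨hmem, by simpa using hlt⟩
        rw [hFnil] at this; simp at this
      have hs : s = m := by rw [hsdef, hFnil]; rfl
      rw [← hFdef, hFnil]
      simp only [List.foldl_nil]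
      have hcond : v < M ∧ (s = M ∨ v > s) := ⟨hvM, Or.inl (hs.trans hmMeq)⟩
      rw [if_neg hvpos, if_pos hcond]
      have : max (min m v) v = v := max_eq_right (min_le_right m v)
      rw [this]
    · obtain ⟨f0, Ftl, hFe⟩ := List.exists_cons_of_ne_nil hFnil
      have hf0 : f0 ∈ F := by rw [hFe]; simp
      have hmf0 : m ≤ f0 := hallm f0 (hFmem f0 hf0).1
      have hm'f0 : min m v ≤ f0 := le_trans (min_le_left m v) hmf0
      have habs : F.foldl max (min m v) = F.foldl max m := by
        rw [hFe, foldl_max_absorb Ftl hm'f0, foldl_max_absorb Ftl hmf0]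
      have hmltM : m < M := lt_of_le_of_lt hmf0 (hFmem f0 hf0).2
      have hsltM : s < M := foldl_max_lt hmltM (fun x hx => (hFmem x hx).2)
      rw [← hFdef, habs, ← hsdef]
      rw [if_neg hvpos]
      by_cases hvs : v > s
      · rw [if_pos ⟨hvM, Or.inr hvs⟩, max_eq_right hvs.le]
      · have : ¬ (v < M ∧ (s = M ∨ v > s)) := by
          rintro ⟨-, h | h⟩
          · exact absurd h hsltM.ne
          · exact hvs h
        rw [if_neg this, max_eq_left (not_lt.mp hvs)]
  · -- v = M : nothing changes
    have hMeq : max M v = M := by rw [hvM]; exact max_self M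
    rw [hM', hm', hMeq, hcons, List.filter_append]
    have hf : List.filter (fun z => decide (z < M)) [v] = [] := by simp [hvM]
    rw [hf, List.append_nil]
    have hminv : min m v = m := min_eq_left (by rw [hvM]; exact hmM)
    rw [hminv]
    have h1 : ¬ v > M := by rw [hvM]; exact lt_irrefl M
    have h2 : ¬ (v < M ∧ (s = M ∨ v > s)) := by
      rintro ⟨h, -⟩; rw [hvM] at h; exact lt_irrefl M h
    rw [if_neg h1, if_neg h2]
  · -- M < v : v is the new max, old max becomes second
    have hMeq : max M v = v := max_eq_right hvM.le
    rw [hM', hm', hMeq, hcons, List.filter_append]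
    have hF1 : List.filter (fun z => decide (z < v)) (a :: t) = a :: t :=
      List.filter_eq_self.mpr (fun x hx => by simpa using lt_of_le_of_lt (hallM x hx) hvM)
    have hF2 : List.filter (fun z => decide (z < v)) [v] = [] := by simp
    rw [hF1, hF2, List.append_nil]
    have hmva : min m v ≤ a := le_trans (min_le_left m v) hmA
    rw [foldl_max_absorb t hmva, ← hMdef]
    rw [if_pos hvM]

-- ---- folding set-updates over an outer loop ----
theorem setfold_update {α β : Type} [BEq α] [LawfulBEq α] (K : List β)
    (L : β → List α) (s : PySem.Set α) :
    K.foldl (fun s k => PySem.Set.update s (L k)) s = PySem.Set.update s (K.flatMap L) := by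
  induction K generalizing s with
  | nil => simp [PySem.Set.update_nil]
  | cons k K ih =>
    simp only [List.foldl_cons, List.flatMap_cons]
    rw [ih, PySem.Set.update_append]

-- ---- A's loop nest produces set(LA) ----
theorem A_eq_ofList (nums : List Int) (n : Int) :
    get_unique_pairs_count nums n = ((PySem.Set.ofList (LA nums n)).length : Int) := by
  unfold get_unique_pairs_count LA
  have hbody : ∀ (up : PySem.Set (Int × Int)) (k : Int),
      (PySem.List.pyRange 0 (n - k + 1) 1).foldl (fun up j =>
        let sub_arr := PySem.List.slice nums (some j) (some (k + j))
        let xy := get_max_and_sec_max sub_arr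
        if xy ∈ up then up else up ++ [xy]) up
      = PySem.Set.update up ((PySem.List.pyRange 0 (n - k + 1) 1).map (fun j =>
          get_max_and_sec_max (PySem.List.slice nums (some j) (some (k + j))))) := by
    intro up k
    rw [PySem.Set.update_map_eq_foldl_add]
    have hfun : (fun (up : PySem.Set (Int × Int)) (j : Int) =>
        let sub_arr := PySem.List.slice nums (some j) (some (k + j))
        let xy := get_max_and_sec_max sub_arr
        if xy ∈ up then up else up ++ [xy])
        = (fun (up : PySem.Set (Int × Int)) (j : Int) =>
            PySem.Set.add up (get_max_and_sec_max (PySem.List.slice nums (some j) (some (k + j))))) := by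
      funext up j
      simp [PySem.Set.add_eq_ite]
    rw [hfun]
  simp only [hbody]
  rw [setfold_update]
  rw [show (([] : List (Int × Int)) : PySem.Set (Int × Int)) = [] from rfl, PySem.Set.update_nil_left]

-- ---- B's loop nest produces set(LB) ----
theorem B_inner (nums : List Int) (idxs : List Int) :
    ∀ (x y : Int) (pairs : PySem.Set (Int × Int)),
    idxs.foldl (fun (st : Int × Int × PySem.Set (Int × Int)) i =>
          let v := PySem.List.pyGetD nums i 0
          let xy : Int × Int :=
            if v > st.1 then (v, st.1)
            else if v < st.1 ∧ (st.2.1 = st.1 ∨ v > st.2.1) then (st.1, v)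
            else (st.1, st.2.1)
          (xy.1, xy.2, PySem.Set.add st.2.2 xy)) (x, y, pairs)
      = ((idxs.foldl (fun p i => stepP p (PySem.List.pyGetD nums i 0)) (x, y)).1,
         (idxs.foldl (fun p i => stepP p (PySem.List.pyGetD nums i 0)) (x, y)).2,
         PySem.Set.update pairs (bPairs nums x y idxs)) := by
  induction idxs with
  | nil => intro x y pairs; simp [bPairs, PySem.Set.update_nil]
  | cons i rest ih =>
    intro x y pairs
    simp only [List.foldl_cons, bPairs, PySem.Set.update_cons]
    rw [ih]
    rfl

theorem B_eq_ofList (nums : List Int) (n : Int) :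
    get_unique_pairs_count_alt nums n = ((PySem.Set.ofList (LB nums n)).length : Int) := by
  unfold get_unique_pairs_count_alt LB
  have hbody : ∀ (pairs : PySem.Set (Int × Int)) (j : Int),
      ((PySem.List.pyRange (j + 1) n 1).foldl
        (fun (st : Int × Int × PySem.Set (Int × Int)) i =>
          let v := PySem.List.pyGetD nums i 0
          let xy : Int × Int :=
            if v > st.1 then (v, st.1)
            else if v < st.1 ∧ (st.2.1 = st.1 ∨ v > st.2.1) then (st.1, v)
            else (st.1, st.2.1)
          (xy.1, xy.2, PySem.Set.add st.2.2 xy))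
        (PySem.List.pyGetD nums j 0, PySem.List.pyGetD nums j 0, pairs)).2.2
      = PySem.Set.update pairs (bPairs nums (PySem.List.pyGetD nums j 0)
          (PySem.List.pyGetD nums j 0) (PySem.List.pyRange (j + 1) n 1)) := by
    intro pairs j
    rw [B_inner]
  simp only [hbody]
  rw [setfold_update]
  rw [show (PySem.Set.empty : PySem.Set (Int × Int)) = [] from rfl, PySem.Set.update_nil_left]

-- ---- windows ----
theorem pairOf_nil (a : Int) : pairOf a [] = (a, a) := by
  simp [pairOf]

theorem pyGetD_nat (nums : List Int) (jn : Nat) (h : jn < nums.length) :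
    PySem.List.pyGetD nums (jn : Int) 0 = nums[jn] := by
  simp [PySem.List.pyGetD_natCast, List.getD_eq_getElem?_getD, List.getElem?_eq_getElem h]

theorem gm_slice (nums : List Int) (jn kn : Nat) (h2 : 2 ≤ kn)
    (hlen : jn + kn ≤ nums.length) :
    get_max_and_sec_max (PySem.List.slice nums (some (jn : Int)) (some ((kn : Int) + jn)))
      = wp nums jn (jn + kn) := by
  have hkj : ((kn : Int) + jn) = ((jn : Int) + (kn : Int)) := by ring
  rw [hkj, PySem.List.slice_natCast_add]
  have hjn : jn < nums.length := by omega
  obtain ⟨k', rfl⟩ : ∃ k', kn = k' + 1 := ⟨kn - 1, by omega⟩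
  rw [List.drop_eq_getElem_cons hjn, List.take_succ_cons, gm_cons]
  unfold wp
  rw [pyGetD_nat nums jn hjn]
  rw [show jn + (k' + 1) - (jn + 1) = k' from by omega]

theorem take_drop_snoc (nums : List Int) (jn sn : Nat) (hj : jn < sn)
    (hs : sn < nums.length) :
    (nums.drop (jn + 1)).take (sn + 1 - (jn + 1))
      = (nums.drop (jn + 1)).take (sn - (jn + 1)) ++ [nums[sn]] := by
  have hq : sn - (jn + 1) < (nums.drop (jn + 1)).length := by
    simp [List.length_drop]; omega
  rw [show sn + 1 - (jn + 1) = (sn - (jn + 1)) + 1 by omega]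
  rw [List.take_add_one, List.getElem?_eq_getElem hq]
  have : (nums.drop (jn + 1))[sn - (jn + 1)] = nums[sn] := by
    rw [List.getElem_drop]
    congr 1
    omega
  rw [this]
  rfl

theorem wp_succ (nums : List Int) (jn sn : Nat) (hj : jn < sn) (hs : sn < nums.length) :
    stepP (wp nums jn sn) nums[sn] = wp nums jn (sn + 1) := by
  unfold wp
  rw [take_drop_snoc nums jn sn hj hs, ← stepP_pairOf]

theorem bPairs_range (nums : List Int) (jn : Nat) :
    ∀ (c sn : Nat), jn < sn → sn + c ≤ nums.length →
    bPairs nums (wp nums jn sn).1 (wp nums jn sn).2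
        (PySem.List.pyRange (sn : Int) ((sn : Int) + (c : Int)) 1)
      = (List.range c).map (fun r => wp nums jn (sn + r + 1)) := by
  intro c
  induction c with
  | zero =>
    intro sn _ _
    rw [PySem.List.pyRange_one_eq_nil (by omega)]
    simp [bPairs]
  | succ c ih =>
    intro sn hsn hlen
    rw [PySem.List.pyRange_one_cons (by push_cast; omega)]
    have hs : sn < nums.length := by omega
    simp only [bPairs]
    rw [pyGetD_nat nums sn hs]
    have hstep : stepP ((wp nums jn sn).1, (wp nums jn sn).2) nums[sn] = wp nums jn (sn + 1) := by
      rw [Prod.mk.eta]; exact wp_succ nums jn sn hsn hs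
    rw [hstep]
    have hrest : ((sn : Int) + 1) = ((sn + 1 : Nat) : Int) := by push_cast; ring
    have hrest2 : ((sn : Int) + ((c : Nat) + 1 : Nat)) = (((sn + 1 : Nat) : Int) + (c : Int)) := by
      push_cast; ring
    rw [hrest, hrest2, ih (sn + 1) (by omega) (by omega)]
    rw [List.range_succ_eq_map]
    simp only [List.map_cons, List.map_map]
    refine congrArg₂ List.cons rfl ?_
    apply List.map_congr_left
    intro r _
    simp only [Function.comp_apply]
    rw [show sn + 1 + r + 1 = sn + Nat.succ r + 1 from by omega]

-- ---- membership characterizations: both streams see exactly the windows nums[jn:en], 2 ≤ en - jn, en ≤ n ----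
theorem mem_LA (nums : List Int) (n : Int) (hn : n ≤ (nums.length : Int)) (p : Int × Int) :
    p ∈ LA nums n ↔ ∃ jn en : Nat, jn + 2 ≤ en ∧ en ≤ n.toNat ∧ p = wp nums jn en := by
  unfold LA
  simp only [List.mem_flatMap, List.mem_map, PySem.List.mem_pyRange_one]
  constructor
  · rintro ⟨k, ⟨hk2, hkn⟩, j, ⟨hj0, hjk⟩, hp⟩
    refine ⟨j.toNat, j.toNat + k.toNat, by omega, by omega, ?_⟩
    rw [← hp]
    rw [show j = ((j.toNat : Nat) : Int) from by omega,
        show k = ((k.toNat : Nat) : Int) from by omega]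
    exact gm_slice nums j.toNat k.toNat (by omega) (by omega)
  · rintro ⟨jn, en, h2, hen, rfl⟩
    refine ⟨(en : Int) - jn, ⟨by omega, by omega⟩, (jn : Int), ⟨by omega, by omega⟩, ?_⟩
    rw [show ((en : Int) - (jn : Int)) = ((en - jn : Nat) : Int) from by omega]
    have h := gm_slice nums jn (en - jn) (by omega) (by omega)
    rw [show jn + (en - jn) = en from by omega] at h
    exact h

theorem wp_start (nums : List Int) (jn : Nat) (h : jn < nums.length) :
    wp nums jn (jn + 1) = (nums[jn], nums[jn]) := by
  unfold wp
  rw [pyGetD_nat nums jn h, show jn + 1 - (jn + 1) = 0 from by omega]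
  simp [pairOf_nil]

theorem bPairs_start (nums : List Int) (jn c : Nat) (hj : jn < nums.length)
    (hc : (jn + 1) + c ≤ nums.length) :
    bPairs nums nums[jn] nums[jn]
        (PySem.List.pyRange ((jn + 1 : Nat) : Int) (((jn + 1 : Nat) : Int) + (c : Int)) 1)
      = (List.range c).map (fun r => wp nums jn ((jn + 1) + r + 1)) := by
  have h := bPairs_range nums jn c (jn + 1) (by omega) hc
  rw [wp_start nums jn hj] at h
  exact h

theorem mem_LB (nums : List Int) (n : Int) (hn : n ≤ (nums.length : Int)) (p : Int × Int) :
    p ∈ LB nums n ↔ ∃ jn en : Nat, jn + 2 ≤ en ∧ en ≤ n.toNat ∧ p = wp nums jn en := by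
  unfold LB
  simp only [List.mem_flatMap, PySem.List.mem_pyRange_one]
  constructor
  · rintro ⟨j, ⟨hj0, hjn⟩, hp⟩
    have hjlen : j.toNat < nums.length := by omega
    rw [show j = ((j.toNat : Nat) : Int) from by omega] at hp
    rw [pyGetD_nat nums j.toNat hjlen] at hp
    have hr : PySem.List.pyRange (((j.toNat : Nat) : Int) + 1) n 1
        = PySem.List.pyRange ((j.toNat + 1 : Nat) : Int)
            (((j.toNat + 1 : Nat) : Int) + ((n.toNat - (j.toNat + 1) : Nat) : Int)) 1 := by
      congr 1 <;> push_cast <;> omega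
    rw [hr, bPairs_start nums j.toNat (n.toNat - (j.toNat + 1)) hjlen (by omega)] at hp
    obtain ⟨r, hrmem, hrp⟩ := List.mem_map.mp hp
    have hrlt := List.mem_range.mp hrmem
    exact ⟨j.toNat, (j.toNat + 1) + r + 1, by omega, by omega, hrp.symm⟩
  · rintro ⟨jn, en, h2, hen, rfl⟩
    refine ⟨(jn : Int), ⟨by omega, by omega⟩, ?_⟩
    have hjlen : jn < nums.length := by omega
    rw [pyGetD_nat nums jn hjlen]
    have hr : PySem.List.pyRange ((jn : Int) + 1) n 1
        = PySem.List.pyRange ((jn + 1 : Nat) : Int)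
            (((jn + 1 : Nat) : Int) + ((n.toNat - (jn + 1) : Nat) : Int)) 1 := by
      congr 1 <;> push_cast <;> omega
    rw [hr, bPairs_start nums jn (n.toNat - (jn + 1)) hjlen (by omega)]
    refine List.mem_map.mpr ⟨en - jn - 2, List.mem_range.mpr (by omega), ?_⟩
    rw [show (jn + 1) + (en - jn - 2) + 1 = en from by omega]

-- ===== VERDICT (by name: the statement is the Claim_ definition above) =====
theorem get_unique_pairs_count_spec : Claim_equal_get_unique_pairs_count := by
  intro nums n _hdom hpre
  unfold Pre_get_unique_pairs_count at hpre
  unfold Spec_get_unique_pairs_count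
  rw [A_eq_ofList, B_eq_ofList]
  have hperm : (PySem.Set.ofList (LA nums n)).Perm (PySem.Set.ofList (LB nums n)) := by
    rw [List.perm_ext_iff_of_nodup (PySem.Set.nodup_ofList _) (PySem.Set.nodup_ofList _)]
    intro p
    rw [PySem.Set.mem_ofList, PySem.Set.mem_ofList, mem_LA nums n hpre p, mem_LB nums n hpre p]
  rw [hperm.length_eq]
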